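-- pv_equiv track=rewrite | github.com/ArturLange/advent-of-code | 2020/day6.py | part2
-- ===== SOURCE A (Python) =====
-- import string
--
-- def part2(input_):
--     result = 0
--     for group in input_:
--         letters = set(string.ascii_lowercase)
--         for answers in group:
--             letters &= set(answers)
--         result += len(letters)
--     return result
-- ===== SOURCE B (Python) =====
-- import string
--
-- def part2(input_):
--     result = 0
--     for group in input_:
--         for ch in string.ascii_lowercase:
--             if all(ch in answers for answers in group):
--                 result += 1
--     return result
-- ===== Notes on version B (the rewrite author's own statement) =====
-- stated objective: idiomatic
-- what changed: Replaces the incremental per-group set-intersection accumulator with a direct scan of the 26 candidate letters, counting each letter that all() answers of the group contain.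
import Mathlib
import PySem

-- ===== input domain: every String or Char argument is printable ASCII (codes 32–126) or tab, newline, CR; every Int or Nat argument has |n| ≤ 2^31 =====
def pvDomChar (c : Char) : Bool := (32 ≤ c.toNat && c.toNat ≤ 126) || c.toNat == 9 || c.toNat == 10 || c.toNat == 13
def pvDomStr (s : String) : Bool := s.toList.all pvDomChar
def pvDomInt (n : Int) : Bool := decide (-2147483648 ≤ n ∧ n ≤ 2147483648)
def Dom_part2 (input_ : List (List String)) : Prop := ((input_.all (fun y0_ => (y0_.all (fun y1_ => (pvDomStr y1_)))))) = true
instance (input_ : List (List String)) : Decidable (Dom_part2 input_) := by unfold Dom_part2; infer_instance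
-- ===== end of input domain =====

-- B replaces A's incremental set-intersection per group with a scan of the 26 candidate
-- letters, counting those contained in every answer of the group (idiomatic decomposition).


-- ===== PORT A =====
def part2 (input_ : List (List String)) : Int :=
  input_.foldl (fun result group =>
    result + PySem.Set.len
      (group.foldl (fun letters answers =>
          PySem.Set.inter letters (PySem.Set.ofList answers.toList))
        (PySem.Set.ofList "abcdefghijklmnopqrstuvwxyz".toList))) 0

-- ===== PORT B =====
def part2_alt (input_ : List (List String)) : Int :=
  input_.foldl (fun result group =>
    "abcdefghijklmnopqrstuvwxyz".toList.foldl (fun r ch =>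
      if group.all (fun answers => answers.toList.contains ch) then r + 1 else r)
      result) 0

-- ===== PRECONDITION & SPEC =====
def Spec_part2 (input_ : List (List String)) (out : Int) : Prop := out = part2_alt input_
instance (input_ : List (List String)) (out : Int) : Decidable (Spec_part2 input_ out) := by unfold Spec_part2; infer_instance

-- ===== CLAIM (what is proved, stated in full; the proofs are below) =====
def Claim_equal_part2 : Prop := ∀ (input_ : List (List String)), Dom_part2 input_ → Spec_part2 input_ (part2 input_)

-- ===== LEMMAS AND PROOFS =====

-- A's intersection fold over a group filters the start set by "contained in every answer".
theorem pv_foldl_inter (l : List String) (s : List Char) :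
    l.foldl (fun letters answers =>
        PySem.Set.inter letters (PySem.Set.ofList answers.toList)) s
      = s.filter (fun c => l.all (fun a => a.toList.contains c)) := by
  induction l generalizing s with
  | nil => simp
  | cons a l ih =>
      rw [List.foldl_cons, ih]
      simp only [PySem.Set.inter, List.filter_filter]
      refine List.filter_congr (fun c _ => ?_)
      simp [PySem.Set.contains, Bool.and_comm]

-- B's counting fold over the alphabet is the start value plus countP.
theorem pv_foldl_count (p : Char → Bool) (l : List Char) (r : Int) :
    l.foldl (fun r ch => if p ch then r + 1 else r) r = r + l.countP p := by
  induction l generalizing r with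
  | nil => simp
  | cons c l ih =>
      by_cases h : p c = true <;> simp [h, ih] <;> try ring

theorem pv_group_eq (group : List String) (r : Int) :
    r + PySem.Set.len
      (group.foldl (fun letters answers =>
          PySem.Set.inter letters (PySem.Set.ofList answers.toList))
        (PySem.Set.ofList "abcdefghijklmnopqrstuvwxyz".toList))
    = "abcdefghijklmnopqrstuvwxyz".toList.foldl (fun r ch =>
        if group.all (fun answers => answers.toList.contains ch) then r + 1 else r) r := by
  rw [pv_foldl_inter, pv_foldl_count, PySem.Set.len, List.countP_eq_length_filter]
  have : PySem.Set.ofList "abcdefghijklmnopqrstuvwxyz".toList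
      = "abcdefghijklmnopqrstuvwxyz".toList := by decide
  rw [this]

-- ===== VERDICT (by name: the statement is the Claim_ definition above) =====
theorem part2_spec : Claim_equal_part2 := by
  intro input_ _
  unfold Spec_part2 part2 part2_alt
  induction input_ using List.reverseRecOn with
  | nil => rfl
  | append_singleton l g ih => simp only [List.foldl_append, List.foldl_cons, List.foldl_nil, pv_group_eq]
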